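-- pv_equiv track=rewrite | github.com/fran-veiga/Lexer | automatas/opmult.py | afd_opmul
-- ===== SOURCE A (Python) =====
-- def afd_opmul(lexema):
--     tabla_transicion = {
--         'A': {"*":"B", "/":"B"},
--         'B': {},
--         'T': {},
--     }
--     estado_actual = "A"
--     estados_finales = ["B"]
--
--     for c in lexema:
--         if c in tabla_transicion[estado_actual]:
--             estado_actual = tabla_transicion[estado_actual][c]
--         else:
--             estado_actual = 'T'
--             break
--     if estado_actual in estados_finales:
--         return "FINAL"
--     elif estado_actual == 'T':
--         return "TRAMPA"
--     else:
--         return "NO FINAL"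
-- ===== SOURCE B (Python) =====
-- def afd_opmul(lexema):
--     chars = list(lexema)
--     if not chars:
--         return "NO FINAL"
--     elif len(chars) == 1 and chars[0] in ('*', '/'):
--         return "FINAL"
--     else:
--         return "TRAMPA"
-- ===== Notes on version B (the rewrite author's own statement) =====
-- stated objective: simpler
-- what changed: Replaced the transition-table DFA simulation loop with a direct closed-form classification: empty -> NO FINAL, single '*' or '/' -> FINAL, otherwise TRAMPA.
import Mathlib
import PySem

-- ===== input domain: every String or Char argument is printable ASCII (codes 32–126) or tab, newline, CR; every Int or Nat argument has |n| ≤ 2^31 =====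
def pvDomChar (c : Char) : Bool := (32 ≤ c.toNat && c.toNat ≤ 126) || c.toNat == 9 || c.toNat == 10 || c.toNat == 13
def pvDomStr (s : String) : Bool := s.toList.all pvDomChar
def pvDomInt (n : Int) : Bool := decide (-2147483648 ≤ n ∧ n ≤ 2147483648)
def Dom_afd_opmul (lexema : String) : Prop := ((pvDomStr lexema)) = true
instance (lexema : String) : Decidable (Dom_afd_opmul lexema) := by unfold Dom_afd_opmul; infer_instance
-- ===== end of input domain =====

-- B replaces A's transition-table DFA loop with a direct closed-form classification (objective: simpler).


-- ===== PORT A =====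
-- tabla_transicion as a function from state to its row (an association list, like the Python dict rows)
def afdTabla (st : String) : List (Char × String) :=
  if st = "A" then [('*', "B"), ('/', "B")] else []

-- the for-loop with its break: c in tabla[st] → follow the transition, else state := 'T' and break
def afdLoop : List Char → String → String
  | [], st => st
  | c :: cs, st =>
    match (afdTabla st).lookup c with
    | some st' => afdLoop cs st'
    | none => "T"

def afd_opmul (lexema : String) : String :=
  let estado_final := afdLoop lexema.toList "A"
  if estado_final ∈ ["B"] then "FINAL"
  else if estado_final = "T" then "TRAMPA"
  else "NO FINAL"

-- ===== PORT B =====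
def afd_opmul_alt (lexema : String) : String :=
  match lexema.toList with
  | [] => "NO FINAL"
  | [c] => if c = '*' ∨ c = '/' then "FINAL" else "TRAMPA"
  | _ => "TRAMPA"

-- ===== PRECONDITION & SPEC =====
def Spec_afd_opmul (lexema : String) (out : String) : Prop := out = afd_opmul_alt lexema
instance (lexema : String) (out : String) : Decidable (Spec_afd_opmul lexema out) := by unfold Spec_afd_opmul; infer_instance

-- ===== CLAIM (what is proved, stated in full; the proofs are below) =====
def Claim_equal_afd_opmul : Prop := ∀ (lexema : String), Dom_afd_opmul lexema → Spec_afd_opmul lexema (afd_opmul lexema)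

-- ===== LEMMAS AND PROOFS =====

-- ===== VERDICT (by name: the statement is the Claim_ definition above) =====
theorem afd_opmul_spec : Claim_equal_afd_opmul := by
  intro lexema _
  unfold Spec_afd_opmul afd_opmul afd_opmul_alt
  cases h : lexema.toList with
  | nil => simp [afdLoop]
  | cons c cs =>
    cases cs with
    | nil =>
      rcases Decidable.em (c = '*' ∨ c = '/') with hc | hc
      · rcases hc with h1 | h1 <;> subst h1 <;> decide
      · have e1 : (c == '*') = false := beq_false_of_ne (fun e => hc (Or.inl e))
        have e2 : (c == '/') = false := beq_false_of_ne (fun e => hc (Or.inr e))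
        simp [afdLoop, afdTabla, List.lookup, e1, e2, hc]
    | cons d ds =>
      rcases Decidable.em (c = '*' ∨ c = '/') with hc | hc
      · rcases hc with h1 | h1 <;> subst h1 <;> simp [afdLoop, afdTabla, List.lookup]
      · have e1 : (c == '*') = false := beq_false_of_ne (fun e => hc (Or.inl e))
        have e2 : (c == '/') = false := beq_false_of_ne (fun e => hc (Or.inr e))
        simp [afdLoop, afdTabla, List.lookup, e1, e2]
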